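-- pv_equiv track=rewrite | github.com/xstupi00/University-Course-Timetabling-Problem | src/differential_evolution.py | _construct_sequences
-- ===== SOURCE A (Python) =====
-- def _construct_sequences(day_timeslots):
--     sequences, sequence = [], []
--     timeslots_len = len(day_timeslots)
--     for idx in range(timeslots_len):
--         sequence.append(day_timeslots[idx])
--         if idx >= timeslots_len - 1 or day_timeslots[idx] + 1 != day_timeslots[idx + 1]:
--             sequences.append(sequence)
--             sequence = []
--     return sequences
-- ===== SOURCE B (Python) =====
-- def _construct_sequences(day_timeslots):
--     if not day_timeslots:
--         return []
--     n = len(day_timeslots)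
--     cuts = [0] + [i for i in range(1, n) if day_timeslots[i - 1] + 1 != day_timeslots[i]] + [n]
--     return [day_timeslots[a:b] for a, b in zip(cuts, cuts[1:])]
-- ===== Notes on version B (the rewrite author's own statement) =====
-- stated objective: alternative
-- what changed: A builds the runs in one accumulate-and-flush loop with a pending-run buffer and a look-ahead break test; B is two staged passes: it first computes the list of cut positions (0, every index where consecutiveness breaks, and the length) and then slices the input between consecutive cut pairs.
import Mathlib
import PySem

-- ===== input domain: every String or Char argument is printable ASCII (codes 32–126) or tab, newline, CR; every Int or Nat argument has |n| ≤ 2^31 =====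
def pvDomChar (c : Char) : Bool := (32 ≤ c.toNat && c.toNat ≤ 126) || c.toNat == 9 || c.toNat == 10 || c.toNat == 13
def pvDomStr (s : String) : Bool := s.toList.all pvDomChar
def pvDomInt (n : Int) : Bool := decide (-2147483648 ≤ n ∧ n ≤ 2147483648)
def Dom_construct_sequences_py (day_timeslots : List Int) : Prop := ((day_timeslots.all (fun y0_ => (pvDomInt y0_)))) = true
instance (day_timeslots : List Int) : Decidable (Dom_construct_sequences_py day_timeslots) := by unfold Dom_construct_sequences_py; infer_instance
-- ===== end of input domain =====

-- B replaces A's accumulate-and-flush loop by two staged passes: first compute the cut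
-- positions where consecutiveness breaks, then slice the list between consecutive cuts. Objective: alternative.

-- ===== PORT A =====
-- literal transliteration of A's index loop with state (sequences, sequence)
def construct_sequences_py (day_timeslots : List Int) : List (List Int) :=
  let timeslots_len : Int := (day_timeslots.length : Int)
  (((PySem.List.pyRange 0 timeslots_len 1).foldl
    (fun (st : List (List Int) × List Int) idx =>
      let sequence := st.2 ++ [PySem.List.pyGetD day_timeslots idx 0]
      if idx ≥ timeslots_len - 1 ∨
         PySem.List.pyGetD day_timeslots idx 0 + 1 ≠ PySem.List.pyGetD day_timeslots (idx + 1) 0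
      then (st.1 ++ [sequence], ([] : List Int))
      else (st.1, sequence))
    ([], [])).1)

-- ===== PORT B =====
-- literal transliteration of B: compute the list of cut positions, then slice between consecutive cuts
def construct_sequences_py_alt (day_timeslots : List Int) : List (List Int) :=
  if day_timeslots.isEmpty then []
  else
    let n : Int := (day_timeslots.length : Int)
    let cuts : List Int :=
      [0] ++ ((PySem.List.pyRange 1 n 1).filter
        (fun i => PySem.List.pyGetD day_timeslots (i - 1) 0 + 1 ≠ PySem.List.pyGetD day_timeslots i 0)) ++ [n]
    (cuts.zip (cuts.drop 1)).map (fun p => PySem.List.slice day_timeslots (some p.1) (some p.2))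

-- ===== PRECONDITION & SPEC =====
def Spec_construct_sequences_py (day_timeslots : List Int) (out : List (List Int)) : Prop := out = construct_sequences_py_alt day_timeslots
instance (day_timeslots : List Int) (out : List (List Int)) : Decidable (Spec_construct_sequences_py day_timeslots out) := by unfold Spec_construct_sequences_py; infer_instance

-- ===== CLAIM (what is proved, stated in full; the proofs are below) =====
def Claim_equal_construct_sequences_py : Prop := ∀ (day_timeslots : List Int), Dom_construct_sequences_py day_timeslots → Spec_construct_sequences_py day_timeslots (construct_sequences_py day_timeslots)

-- ===== LEMMAS AND PROOFS =====

/-- Reference recursion both ports are reduced to: maximal consecutive runs, carrying the pending run `cur`. -/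
def runsGo : List Int → List Int → List (List Int)
  | _, [] => []
  | cur, [a] => [cur ++ [a]]
  | cur, a :: b :: rest =>
      if a + 1 = b then runsGo (cur ++ [a]) (b :: rest)
      else (cur ++ [a]) :: runsGo [] (b :: rest)

-- ---------- A-side reduction (A = runsGo [] ·) ----------

/-- A's loop body re-expressed on Nat indices. -/
def stepN (xs : List Int) (st : List (List Int) × List Int) (k : Nat) :
    List (List Int) × List Int :=
  let sequence := st.2 ++ [xs.getD k 0]
  if k = xs.length - 1 ∨ xs.getD k 0 + 1 ≠ xs.getD (k + 1) 0
  then (st.1 ++ [sequence], []) else (st.1, sequence)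

theorem a_as_stepN (xs : List Int) :
    construct_sequences_py xs = ((List.range xs.length).foldl (stepN xs) ([], [])).1 := by
  show (((PySem.List.pyRange 0 ((xs.length:Nat):Int) 1).foldl
    (fun (st : List (List Int) × List Int) idx =>
      let sequence := st.2 ++ [PySem.List.pyGetD xs idx 0]
      if idx ≥ ((xs.length:Nat):Int) - 1 ∨
         PySem.List.pyGetD xs idx 0 + 1 ≠ PySem.List.pyGetD xs (idx + 1) 0
      then (st.1 ++ [sequence], ([] : List Int))
      else (st.1, sequence))
    ([], [])).1) = _
  rw [PySem.List.pyRange_zero_natCast, List.foldl_map]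
  congr 1
  apply PySem.List.foldl_congr_mem
  intro st k hk
  simp only [List.mem_range] at hk
  have h1 : ((k:Int)+1) = ((k+1 : Nat) : Int) := by push_cast; ring
  simp only [stepN, h1, PySem.List.pyGetD_natCast]
  have h2 : ((k:Int) ≥ (xs.length:Int) - 1) ↔ (k = xs.length - 1) := by omega
  rw [if_congr (or_congr_left h2) rfl rfl]

theorem stepN_runs (xs : List Int) : ∀ (acc : List (List Int)) (cur : List Int),
    ((List.range xs.length).foldl (stepN xs) (acc, cur)).1 = acc ++ runsGo cur xs := by
  induction xs with
  | nil => intro acc cur; simp [runsGo]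
  | cons x xs ih =>
    intro acc cur
    simp only [List.length_cons]
    rw [List.range_succ_eq_map, List.foldl_cons, List.foldl_map]
    have hcong : ∀ (st : List (List Int) × List Int) (k : Nat), k ∈ List.range xs.length →
        stepN (x :: xs) st k.succ = stepN xs st k := by
      intro st k hk
      simp only [List.mem_range] at hk
      simp only [Nat.succ_eq_add_one, stepN, List.getD_cons_succ, List.length_cons]
      have h2 : (k + 1 = xs.length + 1 - 1) ↔ (k = xs.length - 1) := by omega
      rw [if_congr (or_congr_left h2) rfl rfl]
    rw [PySem.List.foldl_congr_mem (List.range xs.length)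
      (fun st k => stepN (x :: xs) st k.succ) (stepN xs) (stepN (x :: xs) (acc, cur) 0) hcong]
    cases xs with
    | nil => simp [stepN, runsGo]
    | cons b rest =>
      by_cases h : x + 1 = b
      · have hinit : stepN (x::b::rest) (acc,cur) 0 = (acc, cur ++ [x]) := by
          simp [stepN, h]
        rw [hinit, ih]
        simp [runsGo, h]
      · have hinit : stepN (x::b::rest) (acc,cur) 0 = (acc ++ [cur ++ [x]], []) := by
          simp [stepN, h]
        rw [hinit, ih]
        simp [runsGo, h]

-- ---------- B-side reduction (B = runsGo [] ·) ----------

/-- B's break positions, on Nat indices. -/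
def breaksN (xs : List Int) : List Nat :=
  (List.range (xs.length - 1)).filter (fun k => decide (xs.getD k 0 + 1 ≠ xs.getD (k + 1) 0))

/-- B's cut positions, on Nat indices: 0, the successors of the break positions, and the length. -/
def cutsN (xs : List Int) : List Nat :=
  0 :: ((breaksN xs).map (· + 1) ++ [xs.length])

/-- B's zip-with-tail slicing, on Nat cut positions. -/
def zipSlices (xs : List Int) : List Nat → List (List Int)
  | [] => []
  | [_] => []
  | a :: b :: rest => ((xs.drop a).take (b - a)) :: zipSlices xs (b :: rest)

/-- Nat-level restatement of B. -/
def altN (xs : List Int) : List (List Int) :=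
  if xs.isEmpty then [] else zipSlices xs (cutsN xs)

theorem zip_map_slices (xs : List Int) : ∀ (cs : List Nat),
    ((cs.map (fun k : Nat => (k : Int))).zip ((cs.map (fun k : Nat => (k : Int))).drop 1)).map
      (fun p => PySem.List.slice xs (some p.1) (some p.2)) = zipSlices xs cs := by
  intro cs
  induction cs with
  | nil => rfl
  | cons a cs ih =>
    cases cs with
    | nil => rfl
    | cons b rest =>
      rw [zipSlices, ← ih, ← PySem.List.slice_natCast xs a b]
      rfl

theorem b_to_altN (xs : List Int) : construct_sequences_py_alt xs = altN xs := by
  unfold construct_sequences_py_alt altN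
  by_cases hne : xs.isEmpty
  · rw [if_pos hne, if_pos hne]
  · rw [if_neg hne, if_neg hne]
    dsimp only
    have hcuts : ([(0:Int)] ++ ((PySem.List.pyRange 1 (xs.length:Int) 1).filter
        (fun i => decide (PySem.List.pyGetD xs (i - 1) 0 + 1 ≠ PySem.List.pyGetD xs i 0))) ++ [(xs.length:Int)])
        = (cutsN xs).map (fun k : Nat => (k : Int)) := by
      rw [PySem.List.pyRange_one]
      have hlen : (((xs.length:Int)) - 1).toNat = xs.length - 1 := by omega
      rw [hlen, List.filter_map]
      have hfc : ∀ k ∈ List.range (xs.length - 1),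
          ((fun i => decide (PySem.List.pyGetD xs (i - 1) 0 + 1 ≠ PySem.List.pyGetD xs i 0)) ∘
            (fun k : Nat => (1:Int) + k)) k
          = decide (xs.getD k 0 + 1 ≠ xs.getD (k + 1) 0) := by
        intro k _
        have e2 : (1:Int) + (k:Int) = (((k+1:Nat)):Int) := by push_cast; ring
        have e1 : (((k+1:Nat)):Int) - 1 = ((k:Nat):Int) := by push_cast; ring
        simp only [Function.comp, e2, e1, PySem.List.pyGetD_natCast]
      rw [List.filter_congr hfc]
      have hmm : ∀ (l : List Nat), l.map ((fun k : Nat => (1:Int) + k)) =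
          (l.map (· + 1)).map (fun k : Nat => (k : Int)) := by
        intro l
        rw [List.map_map]
        apply List.map_congr_left; intro k _
        simp only [Function.comp]; push_cast; ring
      rw [hmm]
      unfold cutsN breaksN
      rw [List.map_cons, List.map_append]
      rfl
    rw [hcuts, zip_map_slices]

/-- Shifting every cut by one and dropping the head element of the list leaves the slices unchanged. -/
theorem zipSlices_shift (x : Int) (xs : List Int) : ∀ (l : List Nat),
    zipSlices (x :: xs) (l.map (· + 1)) = zipSlices xs l := by
  intro l
  induction l with
  | nil => rfl
  | cons a l ih =>
    cases l with
    | nil => rfl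
    | cons b rest =>
      simp only [List.map_cons, zipSlices, List.drop_succ_cons] at ih ⊢
      rw [ih]
      congr 2
      omega

/-- Unfolding `breaksN` over a two-element head. -/
theorem breaksN_cons (a b : Int) (rest : List Int) :
    breaksN (a :: b :: rest) =
      (if a + 1 ≠ b then [0] else []) ++ (breaksN (b :: rest)).map (· + 1) := by
  unfold breaksN
  simp only [List.length_cons, Nat.add_sub_cancel]
  rw [List.range_succ_eq_map, List.filter_cons, List.filter_map]
  have hfc : ∀ k ∈ List.range rest.length,
      ((fun k : Nat => decide ((a :: b :: rest).getD k 0 + 1 ≠ (a :: b :: rest).getD (k + 1) 0)) ∘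
        Nat.succ) k
      = decide ((b :: rest).getD k 0 + 1 ≠ (b :: rest).getD (k + 1) 0) := by
    intro k _
    simp [Function.comp, Nat.succ_eq_add_one]
  rw [List.filter_congr hfc]
  have hmap : (Nat.succ) = (fun x : Nat => x + 1) := by funext k; rfl
  rw [hmap]
  by_cases h : a + 1 = b
  · simp [h]
  · simp [h]

/-- `runsGo` with a pending run prepends it to the head run. -/
theorem runsGo_carry : ∀ (l : List Int) (x : Int) (cur : List Int),
    ∃ h t, runsGo [] (x :: l) = h :: t ∧ runsGo cur (x :: l) = (cur ++ h) :: t := by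
  intro l
  induction l with
  | nil =>
    intro x cur
    exact ⟨[x], [], by simp [runsGo], by simp [runsGo]⟩
  | cons b rest ih =>
    intro x cur
    by_cases hx : x + 1 = b
    · obtain ⟨h, t, h1, h2⟩ := ih b (cur ++ [x])
      obtain ⟨h', t', h1', h2'⟩ := ih b [x]
      rw [h1] at h1'
      obtain ⟨rfl, rfl⟩ := List.cons_eq_cons.mp h1'
      refine ⟨x :: h, t, ?_, ?_⟩
      · show runsGo [] (x :: b :: rest) = _
        rw [runsGo, if_pos hx, List.nil_append, h2']
        simp
      · show runsGo cur (x :: b :: rest) = _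
        rw [runsGo, if_pos hx, h2]
        simp
    · refine ⟨[x], runsGo [] (b :: rest), ?_, ?_⟩
      · show runsGo [] (x :: b :: rest) = _
        rw [runsGo, if_neg hx, List.nil_append]
      · show runsGo cur (x :: b :: rest) = _
        rw [runsGo, if_neg hx]

theorem altN_runs : ∀ (xs : List Int), altN xs = runsGo [] xs := by
  intro xs
  induction xs with
  | nil => rfl
  | cons a ys ih =>
    cases ys with
    | nil =>
      simp [altN, cutsN, breaksN, zipSlices, runsGo]
    | cons b rest =>
      have hne : ((a :: b :: rest).isEmpty) = false := rfl
      have hne' : ((b :: rest).isEmpty) = false := rfl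
      unfold altN
      rw [hne]
      simp only [Bool.false_eq_true, if_false]
      unfold altN at ih
      rw [hne'] at ih
      simp only [Bool.false_eq_true, if_false] at ih
      by_cases h : a + 1 = b
      · -- run continues: the head run grows by `a`
        have hbr : breaksN (a :: b :: rest) = (breaksN (b :: rest)).map (· + 1) := by
          rw [breaksN_cons]; simp [h]
        rcases e : (breaksN (b :: rest)).map (· + 1) ++ [(b :: rest).length] with _ | ⟨c, cs⟩
        · exact absurd e (by simp)
        have hcuts' : cutsN (b :: rest) = 0 :: c :: cs := by unfold cutsN; rw [e]
        have hcu : cutsN (a :: b :: rest) = 0 :: (c + 1) :: cs.map (· + 1) := by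
          unfold cutsN
          rw [hbr]
          have : ((breaksN (b :: rest)).map (· + 1)).map (· + 1) ++ [(a :: b :: rest).length]
              = ((breaksN (b :: rest)).map (· + 1) ++ [(b :: rest).length]).map (· + 1) := by
            simp [List.map_map, List.length_cons]
          rw [this, e, List.map_cons]
        rw [hcu]
        show ((a :: b :: rest).drop 0).take (c + 1 - 0) ::
            zipSlices (a :: b :: rest) ((c + 1) :: cs.map (· + 1)) = _
        have hshift : zipSlices (a :: b :: rest) ((c :: cs).map (· + 1)) =
            zipSlices (b :: rest) (c :: cs) := zipSlices_shift a (b :: rest) (c :: cs)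
        simp only [List.map_cons] at hshift
        rw [hshift]
        rw [hcuts'] at ih
        have ih' : (b :: rest).take c :: zipSlices (b :: rest) (c :: cs) = runsGo [] (b :: rest) := by
          rw [← ih]
          show ((b :: rest).drop 0).take (c - 0) :: _ = zipSlices (b :: rest) (0 :: c :: cs)
          rfl
        obtain ⟨hh, tt, h1, h2⟩ := runsGo_carry rest b [a]
        have hh1 : hh = (b :: rest).take c ∧ tt = zipSlices (b :: rest) (c :: cs) := by
          rw [h1] at ih'
          have := List.cons_eq_cons.mp ih'.symm
          exact ⟨this.1, this.2⟩
        have hrg : runsGo [] (a :: b :: rest) = runsGo [a] (b :: rest) := by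
          simp [runsGo, h]
        rw [hrg, h2, hh1.1, hh1.2]
        simp [List.take_succ_cons]
      · -- run breaks after `a`: `[a]` is its own run
        have hbr : breaksN (a :: b :: rest) = 0 :: (breaksN (b :: rest)).map (· + 1) := by
          rw [breaksN_cons]; simp [h]
        have hcu : cutsN (a :: b :: rest) = 0 :: 1 :: ((breaksN (b :: rest)).map (· + 1)
            ++ [(b :: rest).length]).map (· + 1) := by
          unfold cutsN
          rw [hbr]
          simp [List.map_map, List.length_cons]
        rw [hcu]
        show ((a :: b :: rest).drop 0).take (1 - 0) ::
            zipSlices (a :: b :: rest) (1 :: ((breaksN (b :: rest)).map (· + 1)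
              ++ [(b :: rest).length]).map (· + 1)) = _
        have hshift : zipSlices (a :: b :: rest)
            ((0 :: ((breaksN (b :: rest)).map (· + 1) ++ [(b :: rest).length])).map (· + 1)) =
            zipSlices (b :: rest) (0 :: ((breaksN (b :: rest)).map (· + 1) ++ [(b :: rest).length])) :=
          zipSlices_shift a (b :: rest) _
        simp only [List.map_cons] at hshift
        have h01 : (0 : Nat) + 1 = 1 := rfl
        rw [h01] at hshift
        rw [hshift]
        have : zipSlices (b :: rest) (0 :: ((breaksN (b :: rest)).map (· + 1) ++ [(b :: rest).length]))
            = runsGo [] (b :: rest) := ih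
        rw [this]
        simp [runsGo, h]

-- ===== VERDICT (by name: the statement is the Claim_ definition above) =====
theorem construct_sequences_py_spec : Claim_equal_construct_sequences_py := by
  intro xs _
  unfold Spec_construct_sequences_py
  rw [a_as_stepN, stepN_runs, List.nil_append, b_to_altN, altN_runs]
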